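-- pv_equiv track=rewrite | github.com/daniel-reich/turbo-robot | Ygt4LGupxDAqXNrhS_6.py | spotlight_map
-- ===== SOURCE A (Python) =====
-- def spotlight_map(grid):
--     if grid == []:
--         return []
--     H, W = len(grid), len(grid[0])
--     if H == 0:
--         return []
--     if W == 0:
--         return [[]]
--     ans = [[0 for _ in range(W)] for __ in range(H)]
--     for row in range(H):
--         for col in range(W):
--             S = 0
--             if row > 0:
--                 S += sum(grid[row-1][max(0, col-1):min(W, col+2)])
--             S += sum(grid[row][max(0, col-1):min(W, col+2)])
--             if row < H - 1:
--                 S += sum(grid[row+1][max(0, col-1):min(W, col+2)])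
--             ans[row][col] = S
--     return ans
-- ===== SOURCE B (Python) =====
-- def spotlight_map(grid):
--     if grid == []:
--         return []
--     H, W = len(grid), len(grid[0])
--     if W == 0:
--         return [[]]
--     # separable pass: horizontal window sums per row, then sum a vertical band of rows
--     hs = [[sum(r[max(0, c - 1):min(W, c + 2)]) for c in range(W)] for r in grid]
--     ans = []
--     for i in range(H):
--         band = hs[max(0, i - 1):i + 2]
--         ans.append([sum(row[c] for row in band) for c in range(W)])
--     return ans
-- ===== Notes on version B (the rewrite author's own statement) =====
-- stated objective: faster
-- what changed: B computes the 3x3 neighborhood sums separably: one pass of horizontal window sums per row, then each output row sums a vertical band of up to three precomputed rows, reusing each horizontal sum across up to three output rows instead of A's three fresh slice-sums per cell.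
import Mathlib
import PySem

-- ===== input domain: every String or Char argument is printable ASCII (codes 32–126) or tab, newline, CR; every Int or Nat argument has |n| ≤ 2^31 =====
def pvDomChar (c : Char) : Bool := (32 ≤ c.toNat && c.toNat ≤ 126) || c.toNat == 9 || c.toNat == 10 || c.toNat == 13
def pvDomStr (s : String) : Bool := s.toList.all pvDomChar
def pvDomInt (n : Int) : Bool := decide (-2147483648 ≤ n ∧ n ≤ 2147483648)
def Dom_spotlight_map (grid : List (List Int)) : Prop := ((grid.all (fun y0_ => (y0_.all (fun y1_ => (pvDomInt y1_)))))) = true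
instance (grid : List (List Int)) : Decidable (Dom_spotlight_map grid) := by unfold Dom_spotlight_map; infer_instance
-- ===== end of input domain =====

-- B replaces A's per-cell triple slice-sum by a separable two-pass scheme (horizontal window sums per row,
-- then a vertical band sum), reusing each horizontal sum across up to three output rows (objective: faster, constant factor).

-- ===== PORT A =====
def spotlight_map (grid : List (List Int)) : List (List Int) :=
  if grid = [] then []
  else
    let H : Int := grid.length
    let W : Int := (PySem.List.pyGetD grid 0 []).length
    if H = 0 then []
    else if W = 0 then [[]]
    else
      (PySem.List.pyRange 0 H 1).map (fun row =>
        (PySem.List.pyRange 0 W 1).map (fun col =>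
          let S : Int := 0
          let S := if row > 0 then
              S + (PySem.List.slice (PySem.List.pyGetD grid (row - 1) [])
                    (some (max 0 (col - 1))) (some (min W (col + 2)))).sum
            else S
          let S := S + (PySem.List.slice (PySem.List.pyGetD grid row [])
                    (some (max 0 (col - 1))) (some (min W (col + 2)))).sum
          let S := if row < H - 1 then
              S + (PySem.List.slice (PySem.List.pyGetD grid (row + 1) [])
                    (some (max 0 (col - 1))) (some (min W (col + 2)))).sum
            else S
          S))

-- ===== PORT B =====
def spotlight_map_alt (grid : List (List Int)) : List (List Int) :=
  if grid = [] then []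
  else
    let H : Int := grid.length
    let W : Int := (PySem.List.pyGetD grid 0 []).length
    if W = 0 then [[]]
    else
      let hs := grid.map (fun r =>
        (PySem.List.pyRange 0 W 1).map (fun c =>
          (PySem.List.slice r (some (max 0 (c - 1))) (some (min W (c + 2)))).sum))
      (PySem.List.pyRange 0 H 1).map (fun i =>
        let band := PySem.List.slice hs (some (max 0 (i - 1))) (some (i + 2))
        (PySem.List.pyRange 0 W 1).map (fun c =>
          (band.map (fun row => PySem.List.pyGetD row c 0)).sum))

-- ===== PRECONDITION & SPEC =====
def Spec_spotlight_map (grid : List (List Int)) (out : List (List Int)) : Prop := out = spotlight_map_alt grid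
instance (grid : List (List Int)) (out : List (List Int)) : Decidable (Spec_spotlight_map grid out) := by unfold Spec_spotlight_map; infer_instance

-- ===== CLAIM (what is proved, stated in full; the proofs are below) =====
def Claim_equal_spotlight_map : Prop := ∀ (grid : List (List Int)), Dom_spotlight_map grid → Spec_spotlight_map grid (spotlight_map grid)

-- ===== LEMMAS AND PROOFS =====

-- B's band of rows equals A's conditional three-term sum, pointwise under any g
theorem band_sum (grid : List (List Int)) (g : List Int → Int) (k : Nat) (hk : k < grid.length) :
    ((PySem.List.slice grid (some (max 0 ((k : Int) - 1))) (some ((k : Int) + 2))).map g).sum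
      = ((if (k : Int) > 0 then
            0 + g (PySem.List.pyGetD grid ((k : Int) - 1) []) else 0)
          + g (PySem.List.pyGetD grid (k : Int) []))
        + (if (k : Int) < (grid.length : Int) - 1 then
            g (PySem.List.pyGetD grid ((k : Int) + 1) []) else 0) := by
  rcases k with _ | j
  · -- k = 0
    rcases grid with _ | ⟨x, xs⟩
    · simp at hk
    rcases xs with _ | ⟨y, ys⟩
    · norm_num [PySem.List.slice_to, PySem.List.pyGetD_zero_cons]
      simp
    · norm_num [PySem.List.slice_to, PySem.List.pyGetD_zero_cons, PySem.List.pyGetD_ofNat']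
      simp [List.take_succ_cons]
  · -- k = j + 1
    have hmax : max 0 (((j + 1 : Nat) : Int) - 1) = ((j : Nat) : Int) := by push_cast; omega
    have hb : ((j + 1 : Nat) : Int) + 2 = ((j : Nat) : Int) + ((3 : Nat) : Int) := by push_cast; ring
    rw [hmax, hb, PySem.List.slice_natCast_add]
    have hjlt : j < grid.length := by omega
    have hk' : j + 1 < grid.length := hk
    rw [List.drop_eq_getElem_cons hjlt, List.drop_eq_getElem_cons hk']
    have e1 : ((j + 1 : Nat) : Int) - 1 = ((j : Nat) : Int) := by push_cast; ring
    have e2 : ((j + 1 : Nat) : Int) + 1 = ((j + 2 : Nat) : Int) := by push_cast; ring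
    have hpos : ((j + 1 : Nat) : Int) > 0 := by positivity
    rw [e1, e2, if_pos hpos]
    have A1 : PySem.List.pyGetD grid ((j : Nat) : Int) [] = grid[j] := by
      rw [PySem.List.pyGetD_natCast, List.getD_eq_getElem _ _ hjlt]
    have A2 : PySem.List.pyGetD grid ((j + 1 : Nat) : Int) [] = grid[j + 1] := by
      rw [PySem.List.pyGetD_natCast, List.getD_eq_getElem _ _ hk']
    rw [A1, A2]
    by_cases h2 : j + 2 < grid.length
    · rw [List.drop_eq_getElem_cons h2]
      have hcond : ((j + 1 : Nat) : Int) < (grid.length : Int) - 1 := by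
        push_cast; omega
      have A3 : PySem.List.pyGetD grid ((j + 2 : Nat) : Int) [] = grid[j + 2] := by
        rw [PySem.List.pyGetD_natCast, List.getD_eq_getElem _ _ h2]
      rw [if_pos hcond, A3]
      have tk : ∀ (a b c : List Int) (t : List (List Int)),
          List.take 3 (a :: b :: c :: t) = [a, b, c] := fun _ _ _ _ => rfl
      rw [tk]
      simp only [List.map_cons, List.map_nil, List.sum_cons, List.sum_nil]
      ring
    · have hcond : ¬ ((j + 1 : Nat) : Int) < (grid.length : Int) - 1 := by
        push_cast; omega
      rw [if_neg hcond, List.drop_eq_nil_of_le (by omega)]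
      have tk : ∀ (a b : List Int),
          List.take 3 (a :: b :: ([] : List (List Int))) = [a, b] := fun _ _ => rfl
      rw [tk]
      simp only [List.map_cons, List.map_nil, List.sum_cons, List.sum_nil]
      ring

-- slicing with nonnegative bounds commutes with map
theorem slice_map {α β : Type} (f : α → β) (xs : List α) (a b : Int)
    (ha : 0 ≤ a) (hb : 0 ≤ b) :
    PySem.List.slice (xs.map f) (some a) (some b)
      = (PySem.List.slice xs (some a) (some b)).map f := by
  rw [PySem.List.slice_toNat (xs.map f) ha hb, PySem.List.slice_toNat xs ha hb,
    List.map_take, List.map_drop]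

theorem spotlight_map_eq (grid : List (List Int)) : spotlight_map grid = spotlight_map_alt grid := by
  by_cases hnil : grid = []
  · simp [spotlight_map, spotlight_map_alt, hnil]
  have hlen : 0 < grid.length := List.length_pos_iff.mpr hnil
  have hH : ¬ ((grid.length : Int) = 0) := by exact_mod_cast Nat.pos_iff_ne_zero.mp hlen
  simp only [spotlight_map, spotlight_map_alt, if_neg hnil, if_neg hH]
  by_cases hW : ((PySem.List.pyGetD grid 0 []).length : Int) = 0
  · rw [if_pos hW, if_pos hW]
  rw [if_neg hW, if_neg hW]
  apply List.map_congr_left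
  intro i hi
  rw [PySem.List.mem_pyRange_one] at hi
  obtain ⟨h0, hiH⟩ := hi
  obtain ⟨k, rfl⟩ : ∃ k : Nat, i = (k : Int) := ⟨i.toNat, (Int.toNat_of_nonneg h0).symm⟩
  have hk : k < grid.length := by exact_mod_cast hiH
  rw [slice_map _ _ _ _ (le_max_left 0 _) (by positivity)]
  apply List.map_congr_left
  intro c hc
  rw [PySem.List.mem_pyRange_one] at hc
  simp only [List.map_map]
  have hrow : ∀ r : List Int,
      ((fun row => PySem.List.pyGetD row c 0) ∘ (fun r' =>
        (PySem.List.pyRange 0 ((PySem.List.pyGetD grid 0 []).length : Int) 1).map (fun c' =>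
          (PySem.List.slice r' (some (max 0 (c' - 1)))
            (some (min ((PySem.List.pyGetD grid 0 []).length : Int) (c' + 2)))).sum))) r
      = (PySem.List.slice r (some (max 0 (c - 1)))
          (some (min ((PySem.List.pyGetD grid 0 []).length : Int) (c + 2)))).sum := by
    intro r
    exact PySem.List.pyGetD_map_pyRange_of_nonneg _ _ _ _ hc.1 hc.2
  rw [List.map_congr_left (fun r _ => hrow r)]
  rw [band_sum grid _ k hk]
  split_ifs <;> ring

-- ===== VERDICT (by name: the statement is the Claim_ definition above) =====
theorem spotlight_map_spec : Claim_equal_spotlight_map := by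
  intro grid _
  unfold Spec_spotlight_map
  exact spotlight_map_eq grid
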